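-- pv_equiv track=rewrite | github.com/MultiAgenticSwarm/MultiAgenticSwarm | implementations/flutterswarm/agents/tester.py | _extract_test_files_from_response
-- ===== SOURCE A (Python) =====
-- from typing import Any, Dict, List, Optional
--
-- def _extract_test_files_from_response(response: str) -> List[Dict[str, str]]:
--     """Extract test files from LLM response"""
--     files = []
--
--     lines = response.split("\n")
--     current_file = None
--     current_content = []
--
--     for line in lines:
--         if line.strip().startswith("TEST_FILE:") or line.strip().startswith(
--             "test/"
--         ):
--             if current_file:
--                 files.append(
--                     {"path": current_file, "content": "\n".join(current_content)}
--                 )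
--
--             current_file = (
--                 line.split(":", 1)[1].strip() if ":" in line else line.strip()
--             )
--             current_content = []
--         elif current_file and line.strip():
--             current_content.append(line)
--
--     if current_file:
--         files.append({"path": current_file, "content": "\n".join(current_content)})
--
--     return files
-- ===== SOURCE B (Python) =====
-- def _extract_test_files_from_response(response):
--     """Extract test files from LLM response (segment-parser decomposition)."""
--     lines = response.split("\n")
--
--     def is_header(line):
--         s = line.strip()
--         return s.startswith("TEST_FILE:") or s.startswith("test/")
--
--     def header_path(line):
--         return line.split(":", 1)[1].strip() if ":" in line else line.strip()
--
--     # drop everything before the first header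
--     pos = 0
--     while pos < len(lines) and not is_header(lines[pos]):
--         pos += 1
--
--     files = []
--     while pos < len(lines):
--         head = lines[pos]
--         pos += 1
--         body = []
--         while pos < len(lines) and not is_header(lines[pos]):
--             if lines[pos].strip():
--                 body.append(lines[pos])
--             pos += 1
--         path = header_path(head)
--         if path:
--             files.append({"path": path, "content": "\n".join(body)})
--     return files
-- ===== Notes on version B (the rewrite author's own statement) =====
-- stated objective: alternative
-- what changed: Replaced the current_file/current_content accumulator state machine with a segment parser: drop the preamble, then repeatedly consume one header plus its body lines up to the next header and emit a file per non-empty-path segment.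
import Mathlib
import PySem

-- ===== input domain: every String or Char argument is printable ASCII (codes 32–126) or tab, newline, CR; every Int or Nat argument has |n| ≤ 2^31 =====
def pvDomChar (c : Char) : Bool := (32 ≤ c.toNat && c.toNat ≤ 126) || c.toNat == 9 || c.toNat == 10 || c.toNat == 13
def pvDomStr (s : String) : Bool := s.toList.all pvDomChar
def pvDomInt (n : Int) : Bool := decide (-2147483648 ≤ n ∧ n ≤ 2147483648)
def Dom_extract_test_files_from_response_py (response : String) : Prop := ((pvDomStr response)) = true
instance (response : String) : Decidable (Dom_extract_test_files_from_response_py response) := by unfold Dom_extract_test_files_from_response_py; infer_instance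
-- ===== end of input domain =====

-- B replaces A's accumulator state machine with a segment parser (drop preamble, then consume header+body segments); same behaviour, alternative decomposition.

-- ===== PORT A =====
-- the dict {"path": p, "content": c} as an association list
def pvMkFile (p : String) (c : String) : List (String × String) := [("path", p), ("content", c)]

-- A's loop body: state = (files, current_file ("" models falsy None/empty), current_content)
def pvStepA (st : List (List (String × String)) × String × List String) (line : String) :
    List (List (String × String)) × String × List String :=
  if PySem.Str.startswith (PySem.Str.strip line) "TEST_FILE:"
      || PySem.Str.startswith (PySem.Str.strip line) "test/" then
    let files := if st.2.1 ≠ "" then st.1 ++ [pvMkFile st.2.1 (PySem.Str.join "\n" st.2.2)] else st.1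
    let cf := if PySem.Str.isIn ":" line then
        PySem.Str.strip (PySem.List.pyGetD ((PySem.Str.splitMax? line ":" 1).getD []) 1 "")
      else PySem.Str.strip line
    (files, cf, [])
  else if st.2.1 ≠ "" ∧ PySem.Str.strip line ≠ "" then
    (st.1, st.2.1, st.2.2 ++ [line])
  else st

def extract_test_files_from_response_py (response : String) : List (List (String × String)) :=
  let st : List (List (String × String)) × String × List String :=
    ((PySem.Str.split? response "\n").getD []).foldl pvStepA ([], "", [])
  if st.2.1 ≠ "" then st.1 ++ [pvMkFile st.2.1 (PySem.Str.join "\n" st.2.2)] else st.1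

-- ===== PORT B =====
def pvIsHeader (line : String) : Bool :=
  PySem.Str.startswith (PySem.Str.strip line) "TEST_FILE:"
    || PySem.Str.startswith (PySem.Str.strip line) "test/"

def pvHeaderPath (line : String) : String :=
  if PySem.Str.isIn ":" line then
    PySem.Str.strip (PySem.List.pyGetD ((PySem.Str.splitMax? line ":" 1).getD []) 1 "")
  else PySem.Str.strip line

-- inner while loop: collect the non-blank body lines up to the next header, return (body, rest)
def pvTakeBody : List String → List String × List String
  | [] => ([], [])
  | l :: ls =>
    if pvIsHeader l then ([], l :: ls)
    else
      let br := pvTakeBody ls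
      (if PySem.Str.strip l ≠ "" then l :: br.1 else br.1, br.2)

theorem pvTakeBody_rest_le (ls : List String) : (pvTakeBody ls).2.length ≤ ls.length := by
  induction ls with
  | nil => simp [pvTakeBody]
  | cons l ls ih =>
    simp only [pvTakeBody]
    split
    · simp
    · simpa using Nat.le_succ_of_le ih

-- outer while loop: one file per header segment (skipping segments with an empty path)
def pvParse : List String → List (List (String × String))
  | [] => []
  | head :: ls =>
    let br := pvTakeBody ls
    let path := pvHeaderPath head
    (if path ≠ "" then [pvMkFile path (PySem.Str.join "\n" br.1)] else []) ++ pvParse br.2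
termination_by ls => ls.length
decreasing_by
  simp only [List.length_cons]
  exact Nat.lt_succ_of_le (pvTakeBody_rest_le ls)

def extract_test_files_from_response_py_alt (response : String) : List (List (String × String)) :=
  let lines : List String := (PySem.Str.split? response "\n").getD []
  pvParse (lines.dropWhile (fun l => !pvIsHeader l))

-- ===== PRECONDITION & SPEC =====
def Spec_extract_test_files_from_response_py (response : String) (out : List (List (String × String))) : Prop := out = extract_test_files_from_response_py_alt response
instance (response : String) (out : List (List (String × String))) : Decidable (Spec_extract_test_files_from_response_py response out) := by unfold Spec_extract_test_files_from_response_py; infer_instance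

-- ===== CLAIM (what is proved, stated in full; the proofs are below) =====
def Claim_equal_extract_test_files_from_response_py : Prop := ∀ (response : String), Dom_extract_test_files_from_response_py response → Spec_extract_test_files_from_response_py response (extract_test_files_from_response_py response)

-- ===== LEMMAS AND PROOFS =====

-- proof-side characterisation of A's loop: pvE cf cc ls = files A emits from state (cf, cc) over remaining lines ls
def pvE (cf : String) (cc : List String) : List String → List (List (String × String))
  | [] => if cf ≠ "" then [pvMkFile cf (PySem.Str.join "\n" cc)] else []
  | l :: ls =>
    if pvIsHeader l then
      (if cf ≠ "" then [pvMkFile cf (PySem.Str.join "\n" cc)] else []) ++ pvE (pvHeaderPath l) [] ls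
    else if cf ≠ "" ∧ PySem.Str.strip l ≠ "" then pvE cf (cc ++ [l]) ls
    else pvE cf cc ls

theorem pvA_fold_eq (ls : List String) (files : List (List (String × String))) (cf : String) (cc : List String) :
    (let st := ls.foldl pvStepA (files, cf, cc)
     if st.2.1 ≠ "" then st.1 ++ [pvMkFile st.2.1 (PySem.Str.join "\n" st.2.2)] else st.1)
      = files ++ pvE cf cc ls := by
  induction ls generalizing files cf cc with
  | nil =>
    simp only [List.foldl_nil, pvE]
    split <;> simp
  | cons l ls ih =>
    have hd : (PySem.Str.startswith (PySem.Str.strip l) "TEST_FILE:"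
        || PySem.Str.startswith (PySem.Str.strip l) "test/") = pvIsHeader l := rfl
    rw [List.foldl_cons]
    by_cases h : pvIsHeader l = true
    · rw [pvE, if_pos h]
      by_cases hcf : cf ≠ ""
      · simp only [pvStepA, hd, h, if_true, if_pos hcf]
        rw [ih]
        simp [pvHeaderPath, List.append_assoc]
      · simp only [pvStepA, hd, h, if_true, if_neg hcf]
        rw [ih]
        simp [pvHeaderPath]
    · have h' : pvIsHeader l = false := by simpa using h
      rw [pvE, if_neg h]
      by_cases h2 : cf ≠ "" ∧ PySem.Str.strip l ≠ ""
      · simp only [pvStepA, hd, h', Bool.false_eq_true, if_false, if_pos h2]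
        exact ih files cf (cc ++ [l])
      · simp only [pvStepA, hd, h', Bool.false_eq_true, if_false, if_neg h2]
        exact ih files cf cc

theorem pvE_eq_parse (ls : List String) (cf : String) (cc : List String) :
    pvE cf cc ls =
      (if cf ≠ "" then [pvMkFile cf (PySem.Str.join "\n" (cc ++ (pvTakeBody ls).1))] else [])
        ++ pvParse (pvTakeBody ls).2 := by
  induction ls generalizing cf cc with
  | nil => simp [pvE, pvTakeBody, pvParse]
  | cons l ls ih =>
    by_cases h : pvIsHeader l = true
    · rw [pvE, if_pos h, ih]
      simp only [pvTakeBody, if_pos h]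
      rw [pvParse]
      simp
    · have h' : pvIsHeader l = false := by simpa using h
      rw [pvE, if_neg h]
      simp only [pvTakeBody, h', Bool.false_eq_true, if_false]
      by_cases h2 : cf ≠ "" ∧ PySem.Str.strip l ≠ ""
      · rw [if_pos h2, ih, if_pos h2.1, if_pos h2.1, if_pos h2.2]
        simp
      · rw [if_neg h2, ih]
        by_cases hcf : cf ≠ ""
        · have hl : ¬ PySem.Str.strip l ≠ "" := fun hls => h2 ⟨hcf, hls⟩
          simp [hcf, hl]
        · simp [hcf]

theorem pvTakeBody_rest_eq_dropWhile (ls : List String) :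
    (pvTakeBody ls).2 = ls.dropWhile (fun l => !pvIsHeader l) := by
  induction ls with
  | nil => simp [pvTakeBody]
  | cons l ls ih =>
    simp only [pvTakeBody, List.dropWhile_cons]
    by_cases h : pvIsHeader l = true <;> simp [h, ih]

-- ===== VERDICT (by name: the statement is the Claim_ definition above) =====
theorem extract_test_files_from_response_py_spec : Claim_equal_extract_test_files_from_response_py := by
  intro response _
  unfold Spec_extract_test_files_from_response_py
  unfold extract_test_files_from_response_py extract_test_files_from_response_py_alt
  rw [pvA_fold_eq, pvE_eq_parse, pvTakeBody_rest_eq_dropWhile]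
  simp
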